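-- pv_equiv track=rewrite | github.com/jdiegomt12/kidneys-ct-phase | src/data_processing/resolve_errors.py | _expected_signature
-- ===== SOURCE A (Python) =====
-- from typing import Dict, List, Optional, Tuple
--
-- def _expected_signature(
--     case_id: str,
--     phase: str,
--     dist: Dict[Tuple[str, str], Dict[str, str]],
-- ) -> Dict[str, str]:
--     expected: Dict[str, str] = {}
--     for other_phase in ("arterial", "venous", "late"):
--         if other_phase == phase:
--             continue
--         sig = dist.get((case_id, other_phase))
--         if not sig:
--             continue
--         for key, val in sig.items():
--             if not val:
--                 continue
--             if key not in expected:
--                 expected[key] = val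
--             elif expected[key] != val:
--                 expected[key] = ""
--     return expected
-- ===== SOURCE B (Python) =====
-- def _expected_signature(case_id, phase, dist):
--     collected = {}
--     for other_phase in ("arterial", "venous", "late"):
--         if other_phase == phase:
--             continue
--         for key, val in (dist.get((case_id, other_phase)) or {}).items():
--             if val:
--                 collected[key] = collected.get(key, []) + [val]
--     return {k: vs[0] if all(v == vs[0] for v in vs) else "" for k, vs in collected.items()}
-- ===== Notes on version B (the rewrite author's own statement) =====
-- stated objective: alternative
-- what changed: A merges values into the result dict in place, branching per item on new-key / equal / conflict; B first groups each key's non-empty values across the other phases into lists, then reduces each list to its unique value or ''.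
import Mathlib
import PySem

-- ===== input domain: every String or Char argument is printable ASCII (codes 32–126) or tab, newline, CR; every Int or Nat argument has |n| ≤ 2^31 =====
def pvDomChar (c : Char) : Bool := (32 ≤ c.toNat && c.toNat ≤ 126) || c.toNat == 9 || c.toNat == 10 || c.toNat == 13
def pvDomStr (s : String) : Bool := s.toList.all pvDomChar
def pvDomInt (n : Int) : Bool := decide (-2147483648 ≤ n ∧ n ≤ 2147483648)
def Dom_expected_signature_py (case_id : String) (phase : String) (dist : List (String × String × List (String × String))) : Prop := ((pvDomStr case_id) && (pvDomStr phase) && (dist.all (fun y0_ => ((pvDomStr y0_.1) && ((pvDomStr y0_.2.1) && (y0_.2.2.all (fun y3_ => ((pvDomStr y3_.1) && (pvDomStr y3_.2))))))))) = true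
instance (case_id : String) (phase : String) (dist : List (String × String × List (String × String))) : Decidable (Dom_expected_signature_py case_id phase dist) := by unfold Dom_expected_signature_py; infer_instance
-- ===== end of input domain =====

-- B replaces A's in-place conflict-merge branching by a collect-then-reduce pass (group each key's
-- non-empty values, then emit the unique value or ""); objective: alternative (same cost, different structure).

-- shared primitive: dist.get((case_id, other_phase)) — first match in the association list
def pvGetSig (dist : List (String × String × List (String × String))) (c p : String) : Option (List (String × String)) :=
  (dist.find? (fun e => e.1 == c && e.2.1 == p)).map (·.2.2)

-- ===== PORT A =====
-- one item of the inner loop: skip falsy val, insert new key, blank a conflicting one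
def pvStepA (exp : PySem.Dict String String) (kv : String × String) : PySem.Dict String String :=
  if kv.2 == "" then exp
  else match exp.get? kv.1 with
  | none => exp.insert kv.1 kv.2
  | some w => if w != kv.2 then exp.insert kv.1 "" else exp

def expected_signature_py (case_id : String) (phase : String) (dist : List (String × String × List (String × String))) : List (String × String) :=
  (["arterial", "venous", "late"].foldl (fun exp other_phase =>
      if other_phase == phase then exp
      else match pvGetSig dist case_id other_phase with
      | none => exp                                   -- dist.get(...) is None: "if not sig: continue"
      | some sig =>
        if sig.isEmpty then exp                       -- empty dict is falsy: "if not sig: continue"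
        else sig.foldl pvStepA exp)
    PySem.Dict.empty).items

-- ===== PORT B =====
-- collected[key] = collected.get(key, []) + [val]
def pvStepB (c : PySem.Dict String (List String)) (kv : String × String) : PySem.Dict String (List String) :=
  if kv.2 == "" then c
  else c.insert kv.1 (c.getD kv.1 [] ++ [kv.2])

-- vs[0] if all(v == vs[0] for v in vs) else ""
def pvRed (vs : List String) : String :=
  if vs.all (fun v => v == vs.headD "") then vs.headD "" else ""

def expected_signature_py_alt (case_id : String) (phase : String) (dist : List (String × String × List (String × String))) : List (String × String) :=
  (["arterial", "venous", "late"].foldl (fun c other_phase =>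
      if other_phase == phase then c
      else ((pvGetSig dist case_id other_phase).getD []).foldl pvStepB c)   -- (dist.get(...) or {})
    PySem.Dict.empty).items.map (fun p => (p.1, pvRed p.2))

-- ===== PRECONDITION & SPEC =====
def Spec_expected_signature_py (case_id : String) (phase : String) (dist : List (String × String × List (String × String))) (out : List (String × String)) : Prop := out = expected_signature_py_alt case_id phase dist
instance (case_id : String) (phase : String) (dist : List (String × String × List (String × String))) (out : List (String × String)) : Decidable (Spec_expected_signature_py case_id phase dist out) := by unfold Spec_expected_signature_py; infer_instance

-- ===== CLAIM (what is proved, stated in full; the proofs are below) =====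
def Claim_equal_expected_signature_py : Prop := ∀ (case_id : String) (phase : String) (dist : List (String × String × List (String × String))), Dom_expected_signature_py case_id phase dist → Spec_expected_signature_py case_id phase dist (expected_signature_py case_id phase dist)

-- ===== LEMMAS AND PROOFS =====

-- the reducing map B applies to the collected items
def pvRF (p : String × List String) : String × String := (p.1, pvRed p.2)

-- invariant tying A's accumulator to B's: A's dict is B's dict item-wise reduced,
-- B's keys are unique and every collected list is non-empty
def pvInv (exp : PySem.Dict String String) (c : PySem.Dict String (List String)) : Prop :=
  exp = PySem.Dict.mk (c.items.map pvRF) ∧ c.keys.Nodup ∧ ∀ p ∈ c.items, p.2 ≠ []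

lemma pvRed_singleton (v : String) : pvRed [v] = v := by simp [pvRed]

lemma pvRed_append (vs : List String) (v : String) (hvs : vs ≠ []) (hv : v ≠ "") :
    pvRed (vs ++ [v]) = if pvRed vs == v then pvRed vs else "" := by
  obtain ⟨a, t, rfl⟩ := List.exists_cons_of_ne_nil hvs
  rw [pvRed, pvRed]
  simp only [List.cons_append, List.headD_cons, List.all_cons, beq_self_eq_true, Bool.true_and,
    List.all_append, List.all_cons, List.all_nil, Bool.and_true]
  by_cases hall : t.all (fun x => x == a)
  · by_cases hva : v = a
    · subst hva; simp [hall]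
    · simp [hall, hva]
      intro h; exact absurd h.symm hva
  · simp [hall, Ne.symm hv]

lemma pvGet?_mk_map (l : List (String × List String)) (k : String) :
    (PySem.Dict.mk (l.map pvRF)).get? k = ((PySem.Dict.mk l).get? k).map pvRed := by
  induction l with
  | nil => rfl
  | cons p t ih =>
    rw [List.map_cons, show pvRF p = (p.1, pvRed p.2) from rfl,
        PySem.Dict.get?_mk_cons, PySem.Dict.get?_mk_cons]
    by_cases h : p.1 == k
    · simp [h]
    · simp [h, ih]

lemma pvStep_inv (exp : PySem.Dict String String) (c : PySem.Dict String (List String))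
    (kv : String × String) (h : pvInv exp c) : pvInv (pvStepA exp kv) (pvStepB c kv) := by
  obtain ⟨h1, h2, h3⟩ := h
  by_cases hv : kv.2 = ""
  · simpa [pvStepA, pvStepB, hv] using ⟨h1, h2, h3⟩
  · have hitems : exp.items = c.items.map pvRF := congrArg PySem.Dict.items h1
    cases hc : c.get? kv.1 with
    | none =>
      have hexp : exp.get? kv.1 = none := by
        rw [h1, pvGet?_mk_map, show PySem.Dict.mk c.items = c from PySem.Dict.ext rfl, hc]; rfl
      have hcont : c.contains kv.1 = false := by
        rw [PySem.Dict.contains_eq_isSome_get?, hc]; rfl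
      have hcontE : exp.contains kv.1 = false := by
        rw [PySem.Dict.contains_eq_isSome_get?, hexp]; rfl
      have hA : pvStepA exp kv = exp.insert kv.1 kv.2 := by
        rw [pvStepA]; simp [hv, hexp]
      have hB : pvStepB c kv = c.insert kv.1 [kv.2] := by
        rw [pvStepB]; simp [hv, PySem.Dict.getD_of_get?_eq_none _ _ hc]
      refine ⟨?_, ?_, ?_⟩
      · apply PySem.Dict.ext
        rw [hA, hB, PySem.Dict.items_insert_of_not_contains _ _ hcontE,
            show (PySem.Dict.mk ((c.insert kv.1 [kv.2]).items.map pvRF)).items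
              = (c.insert kv.1 [kv.2]).items.map pvRF from rfl,
            PySem.Dict.items_insert_of_not_contains _ _ hcont, hitems]
        simp [pvRF, pvRed_singleton]
      · rw [hB]; exact PySem.Dict.nodup_keys_insert _ _ _ h2
      · intro p hp
        rw [hB] at hp
        rcases (PySem.Dict.mem_items_insert _ _ _ _).mp hp with h | h
        · subst h; simp
        · exact h3 _ h.1
    | some vs =>
      have hmem : (kv.1, vs) ∈ c.items := PySem.Dict.mem_items_of_get?_eq_some _ hc
      have hvs : vs ≠ [] := h3 _ hmem
      have hexp : exp.get? kv.1 = some (pvRed vs) := by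
        rw [h1, pvGet?_mk_map, show PySem.Dict.mk c.items = c from PySem.Dict.ext rfl, hc]; rfl
      have hcont : c.contains kv.1 = true := by
        rw [PySem.Dict.contains_eq_isSome_get?, hc]; rfl
      have hcontE : exp.contains kv.1 = true := by
        rw [PySem.Dict.contains_eq_isSome_get?, hexp]; rfl
      have hred := pvRed_append vs kv.2 hvs hv
      have hB : pvStepB c kv = c.insert kv.1 (vs ++ [kv.2]) := by
        rw [pvStepB]; simp [hv, PySem.Dict.getD_of_get?_eq_some _ _ hc]
      have hBitems : (pvStepB c kv).items
          = c.items.map (fun p => if (p.1 == kv.1) = true then (kv.1, vs ++ [kv.2]) else p) := by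
        rw [hB, PySem.Dict.items_insert_of_contains _ _ hcont]
      refine ⟨?_, ?_, ?_⟩
      · apply PySem.Dict.ext
        rw [show (PySem.Dict.mk ((pvStepB c kv).items.map pvRF)).items
              = (pvStepB c kv).items.map pvRF from rfl, hBitems, List.map_map]
        by_cases heq : pvRed vs = kv.2
        · -- A leaves exp unchanged; the reduced value at kv.1 is unchanged too
          have hred1 : pvRed (vs ++ [kv.2]) = pvRed vs := by
            rw [hred]; simp [heq]
          have hA : pvStepA exp kv = exp := by
            rw [pvStepA]; simp [hv, hexp, heq]
          rw [hA, hitems]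
          apply List.map_congr_left
          intro p hp
          by_cases hpk : p.1 = kv.1
          · have hgp : c.get? p.1 = some p.2 := PySem.Dict.get?_of_mem_items _ hp h2
            rw [hpk, hc] at hgp
            have hp2 : p.2 = vs := by injection hgp with hgp'; exact hgp'.symm
            simp [Function.comp, pvRF, hpk, hp2, hred1, heq]
          · simp [Function.comp, pvRF, hpk]
        · -- conflict: A blanks the key, the reduced value becomes ""
          have hred1 : pvRed (vs ++ [kv.2]) = "" := by
            rw [hred]; simp [heq]
          have hA : pvStepA exp kv = exp.insert kv.1 "" := by
            rw [pvStepA]; simp [hv, hexp, heq]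
          rw [hA, PySem.Dict.items_insert_of_contains _ _ hcontE, hitems, List.map_map]
          apply List.map_congr_left
          intro p hp
          by_cases hpk : p.1 = kv.1 <;> simp [Function.comp, pvRF, hpk, hred1]
      · rw [hB]; exact PySem.Dict.nodup_keys_insert _ _ _ h2
      · intro p hp
        rw [hB] at hp
        rcases (PySem.Dict.mem_items_insert _ _ _ _).mp hp with h | h
        · subst h; simp [hvs]
        · exact h3 _ h.1
lemma pvFold_inv (l : List (String × String)) (exp : PySem.Dict String String)
    (c : PySem.Dict String (List String)) (h : pvInv exp c) :
    pvInv (l.foldl pvStepA exp) (l.foldl pvStepB c) := by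
  induction l generalizing exp c with
  | nil => exact h
  | cons kv t ih => exact ih _ _ (pvStep_inv _ _ _ h)

lemma pvPhase_inv (dist : List (String × String × List (String × String)))
    (case_id phase op : String) (exp : PySem.Dict String String)
    (c : PySem.Dict String (List String)) (h : pvInv exp c) :
    pvInv (if op == phase then exp
           else match pvGetSig dist case_id op with
           | none => exp
           | some sig => if sig.isEmpty then exp else sig.foldl pvStepA exp)
          (if op == phase then c
           else ((pvGetSig dist case_id op).getD []).foldl pvStepB c) := by
  by_cases hop : op == phase
  · simpa [hop] using h
  · simp only [hop, Bool.false_eq_true, if_false]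
    cases hs : pvGetSig dist case_id op with
    | none => exact h
    | some sig =>
      cases sig with
      | nil => exact h
      | cons x t => exact pvFold_inv _ _ _ h

-- ===== VERDICT (by name: the statement is the Claim_ definition above) =====
theorem expected_signature_py_spec : Claim_equal_expected_signature_py := by
  intro case_id phase dist _
  unfold Spec_expected_signature_py expected_signature_py expected_signature_py_alt
  have h0 : pvInv PySem.Dict.empty PySem.Dict.empty :=
    ⟨PySem.Dict.ext rfl, PySem.Dict.nodup_keys_empty, by intro p hp; cases hp⟩
  have h1 := pvPhase_inv dist case_id phase "arterial" _ _ h0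
  have h2 := pvPhase_inv dist case_id phase "venous" _ _ h1
  have h3 := pvPhase_inv dist case_id phase "late" _ _ h2
  simpa [List.foldl, pvRF] using congrArg PySem.Dict.items h3.1
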